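-- pv_equiv track=rewrite | github.com/hoomanesteki/symbiote-lite-analyst-agent | symbiote_lite/dates.py | _get_month_num
-- ===== SOURCE A (Python) =====
-- MONTH_MAP = {
--     "jan": 1, "january": 1, "janurary": 1, "janury": 1, "januarry": 1, "janaury": 1,
--     "feb": 2, "february": 2, "febuary": 2, "feburary": 2, "februrary": 2, "febrary": 2,
--     "mar": 3, "march": 3, "mach": 3, "mrch": 3,
--     "apr": 4, "april": 4, "apirl": 4, "apil": 4,
--     "may": 5,
--     "jun": 6, "june": 6, "juen": 6,
--     "jul": 7, "july": 7, "jully": 7,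
--     "aug": 8, "august": 8, "agust": 8, "augst": 8,
--     "sep": 9, "sept": 9, "september": 9, "septmber": 9, "setember": 9,
--     "oct": 10, "october": 10, "octobor": 10, "ocotber": 10,
--     "nov": 11, "november": 11, "novemeber": 11, "novmber": 11,
--     "dec": 12, "december": 12, "decmber": 12, "dicember": 12,
-- }
--
-- def _get_month_num(word: str) -> int:
--     w = word.lower().strip()
--     if w in MONTH_MAP:
--         return MONTH_MAP[w]
--     if len(w) >= 3:
--         prefix = w[:3]
--         if prefix in MONTH_MAP:
--             return MONTH_MAP[prefix]
--     for key, val in MONTH_MAP.items():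
--         if len(key) >= 3 and len(w) >= 3 and key[:3] == w[:3]:
--             return val
--     return 0
-- ===== SOURCE B (Python) =====
-- # Every MONTH_MAP key in the original module has length >= 3 and all keys
-- # sharing a first-3-character prefix map to the same month, so a single
-- # literal prefix table replaces the original's three lookup stages.
-- PREFIX_MAP = {
--     "jan": 1, "feb": 2,
--     "mar": 3, "mac": 3, "mrc": 3,
--     "apr": 4, "api": 4,
--     "may": 5,
--     "jun": 6, "jue": 6,
--     "jul": 7,
--     "aug": 8, "agu": 8,
--     "sep": 9, "set": 9,
--     "oct": 10, "oco": 10,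
--     "nov": 11, "dec": 12, "dic": 12,
-- }
--
-- def _get_month_num(word: str) -> int:
--     w = word.lower().strip()
--     return PREFIX_MAP.get(w[:3], 0)
-- ===== Notes on version B (the rewrite author's own statement) =====
-- stated objective: simpler
-- what changed: Replaces A's three lookup stages (exact dict lookup, 3-char-prefix dict lookup, then a linear scan comparing first-3 characters of each key) with a single literal first-3-character prefix table and one lookup with default 0.
import Mathlib
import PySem

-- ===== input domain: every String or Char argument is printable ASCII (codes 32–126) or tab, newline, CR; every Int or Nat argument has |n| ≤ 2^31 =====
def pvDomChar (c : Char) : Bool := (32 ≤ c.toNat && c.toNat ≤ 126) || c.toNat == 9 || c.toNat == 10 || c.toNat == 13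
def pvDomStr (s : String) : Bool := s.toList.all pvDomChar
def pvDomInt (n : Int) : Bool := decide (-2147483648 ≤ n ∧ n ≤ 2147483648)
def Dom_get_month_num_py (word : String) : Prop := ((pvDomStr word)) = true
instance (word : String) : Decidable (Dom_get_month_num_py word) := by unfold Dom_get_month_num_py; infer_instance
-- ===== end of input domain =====

-- B replaces A's three lookup stages with one literal first-3-character
-- prefix table and a single lookup (objective: simpler).

-- ===== PORT A =====
-- shared module-level data MONTH_MAP (keys as List Char)
def monthMap : PySem.Dict (List Char) Int := PySem.Dict.ofList [
  ("jan".toList, 1), ("january".toList, 1), ("janurary".toList, 1), ("janury".toList, 1), ("januarry".toList, 1), ("janaury".toList, 1),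
  ("feb".toList, 2), ("february".toList, 2), ("febuary".toList, 2), ("feburary".toList, 2), ("februrary".toList, 2), ("febrary".toList, 2),
  ("mar".toList, 3), ("march".toList, 3), ("mach".toList, 3), ("mrch".toList, 3),
  ("apr".toList, 4), ("april".toList, 4), ("apirl".toList, 4), ("apil".toList, 4),
  ("may".toList, 5),
  ("jun".toList, 6), ("june".toList, 6), ("juen".toList, 6),
  ("jul".toList, 7), ("july".toList, 7), ("jully".toList, 7),
  ("aug".toList, 8), ("august".toList, 8), ("agust".toList, 8), ("augst".toList, 8),
  ("sep".toList, 9), ("sept".toList, 9), ("september".toList, 9), ("septmber".toList, 9), ("setember".toList, 9),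
  ("oct".toList, 10), ("october".toList, 10), ("octobor".toList, 10), ("ocotber".toList, 10),
  ("nov".toList, 11), ("november".toList, 11), ("novemeber".toList, 11), ("novmber".toList, 11),
  ("dec".toList, 12), ("december".toList, 12), ("decmber".toList, 12), ("dicember".toList, 12)]

-- s[:3]
def sliceTo3 (cs : List Char) : List Char := PySem.List.slice cs none (some 3)

-- A's final for-loop over MONTH_MAP.items(): first key whose first 3 chars match w's
def monthScan (w : List Char) : List (List Char × Int) → Int
  | [] => 0
  | (k, v) :: rest =>
      if 3 ≤ k.length ∧ 3 ≤ w.length ∧ sliceTo3 k = sliceTo3 w then v else monthScan w rest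

-- body of _get_month_num after 'w = word.lower().strip()'
def monthLookup (w : List Char) : Int :=
  match monthMap.get? w with
  | some v => v
  | none =>
    if 3 ≤ w.length then
      match monthMap.get? (sliceTo3 w) with
      | some v => v
      | none => monthScan w monthMap.items
    else monthScan w monthMap.items

def get_month_num_py (word : String) : Int :=
  monthLookup (PySem.Chars.strip (PySem.Chars.lower word.toList))

-- ===== PORT B =====
-- the literal PREFIX_MAP of Source B
def prefixMap : PySem.Dict (List Char) Int := PySem.Dict.ofList [
  ("jan".toList, 1), ("feb".toList, 2),
  ("mar".toList, 3), ("mac".toList, 3), ("mrc".toList, 3),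
  ("apr".toList, 4), ("api".toList, 4),
  ("may".toList, 5),
  ("jun".toList, 6), ("jue".toList, 6),
  ("jul".toList, 7),
  ("aug".toList, 8), ("agu".toList, 8),
  ("sep".toList, 9), ("set".toList, 9),
  ("oct".toList, 10), ("oco".toList, 10),
  ("nov".toList, 11), ("dec".toList, 12), ("dic".toList, 12)]

def get_month_num_py_alt (word : String) : Int :=
  prefixMap.getD (PySem.List.slice (PySem.Chars.strip (PySem.Chars.lower word.toList)) none (some 3)) 0

-- ===== PRECONDITION & SPEC =====
def Spec_get_month_num_py (word : String) (out : Int) : Prop := out = get_month_num_py_alt word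
instance (word : String) (out : Int) : Decidable (Spec_get_month_num_py word out) := by unfold Spec_get_month_num_py; infer_instance

-- ===== CLAIM (what is proved, stated in full; the proofs are below) =====
def Claim_equal_get_month_num_py : Prop := ∀ (word : String), Dom_get_month_num_py word → Spec_get_month_num_py word (get_month_num_py word)

-- ===== LEMMAS AND PROOFS =====

theorem sliceTo3_eq (cs : List Char) : sliceTo3 cs = cs.take 3 := by
  simpa using PySem.List.slice_to cs (b := 3) (by norm_num)

-- every MONTH_MAP entry has a key of length ≥ 3 whose 3-char prefix already
-- determines its value in prefixMap (finite check over the 50 entries)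
set_option maxRecDepth 100000 in
theorem month_key_fact : ∀ kv ∈ monthMap.items,
    3 ≤ kv.1.length ∧ prefixMap.getD (sliceTo3 kv.1) 0 = kv.2 := by decide

-- every key of prefixMap is the 3-char prefix of some MONTH_MAP key (finite check)
set_option maxRecDepth 100000 in
theorem prefix_keys_covered : ∀ pv ∈ prefixMap.items,
    ∃ kv ∈ monthMap.items, sliceTo3 kv.1 = pv.1 := by decide

theorem prefixMap_getD_of_no_match (q : List Char)
    (hq : ∀ kv ∈ monthMap.items, sliceTo3 kv.1 ≠ q) : prefixMap.getD q 0 = 0 := by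
  apply PySem.Dict.getD_of_get?_eq_none
  rw [PySem.Dict.get?_eq_none_iff_not_mem_keys]
  intro hmem
  simp only [PySem.Dict.keys, List.mem_map] at hmem
  obtain ⟨pv, hpv, hq'⟩ := hmem
  obtain ⟨kv, hkv, hkq⟩ := prefix_keys_covered pv hpv
  exact hq kv hkv (by rw [hkq, hq'])

theorem monthScan_eq (w : List Char) (hw : 3 ≤ w.length) :
    ∀ l : List (List Char × Int),
      (∀ kv ∈ l, 3 ≤ kv.1.length ∧ prefixMap.getD (sliceTo3 kv.1) 0 = kv.2) →
      monthScan w l =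
        if ∃ kv ∈ l, sliceTo3 kv.1 = sliceTo3 w then prefixMap.getD (sliceTo3 w) 0 else 0 := by
  intro l
  induction l with
  | nil => intro _; simp [monthScan]
  | cons kv rest ih =>
    intro hl
    obtain ⟨k, v⟩ := kv
    have hk := hl (k, v) List.mem_cons_self
    by_cases hpre : sliceTo3 k = sliceTo3 w
    · have hcond : 3 ≤ k.length ∧ 3 ≤ w.length ∧ sliceTo3 k = sliceTo3 w := ⟨hk.1, hw, hpre⟩
      have hex : ∃ kv ∈ (k, v) :: rest, sliceTo3 kv.1 = sliceTo3 w :=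
        ⟨(k, v), List.mem_cons_self, hpre⟩
      simp only [monthScan]
      have hk2 : prefixMap.getD (sliceTo3 k) 0 = v := hk.2
      rw [if_pos hcond, if_pos hex, ← hpre]
      exact hk2.symm
    · have hcond : ¬(3 ≤ k.length ∧ 3 ≤ w.length ∧ sliceTo3 k = sliceTo3 w) := by
        rintro ⟨-, -, h⟩; exact hpre h
      have hiff : (∃ kv ∈ (k, v) :: rest, sliceTo3 kv.1 = sliceTo3 w) ↔
          (∃ kv ∈ rest, sliceTo3 kv.1 = sliceTo3 w) := by
        constructor
        · rintro ⟨kv', h', hq⟩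
          rcases List.mem_cons.mp h' with rfl | h''
          · exact absurd hq hpre
          · exact ⟨kv', h'', hq⟩
        · rintro ⟨kv', h', hq⟩
          exact ⟨kv', List.mem_cons_of_mem _ h', hq⟩
      simp only [monthScan]
      rw [if_neg hcond, ih (fun kv h => hl kv (List.mem_cons_of_mem _ h))]
      by_cases hex : ∃ kv ∈ rest, sliceTo3 kv.1 = sliceTo3 w
      · rw [if_pos hex, if_pos (hiff.mpr hex)]
      · rw [if_neg hex, if_neg (fun h => hex (hiff.mp h))]

theorem monthScan_short (w : List Char) (hw : ¬ 3 ≤ w.length) :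
    ∀ l : List (List Char × Int), monthScan w l = 0 := by
  intro l
  induction l with
  | nil => rfl
  | cons kv rest ih =>
    obtain ⟨k, v⟩ := kv
    simp only [monthScan]
    rw [if_neg (by rintro ⟨-, h2, -⟩; exact hw h2), ih]

theorem core_eq (w : List Char) :
    monthLookup w = prefixMap.getD (sliceTo3 w) 0 := by
  unfold monthLookup
  rcases h1 : monthMap.get? w with _ | v
  · simp only
    by_cases hw : 3 ≤ w.length
    · rw [if_pos hw]
      rcases h2 : monthMap.get? (sliceTo3 w) with _ | v
      · simp only
        rw [monthScan_eq w hw monthMap.items month_key_fact]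
        by_cases hex : ∃ kv ∈ monthMap.items, sliceTo3 kv.1 = sliceTo3 w
        · rw [if_pos hex]
        · rw [if_neg hex, prefixMap_getD_of_no_match _ (fun kv h hq => hex ⟨kv, h, hq⟩)]
      · have hm := PySem.Dict.mem_items_of_get?_eq_some _ h2
        have hf := (month_key_fact _ hm).2
        have h33 : sliceTo3 (sliceTo3 w) = sliceTo3 w := by
          simp [sliceTo3_eq, List.take_take]
        rw [h33] at hf
        exact hf.symm
    · rw [if_neg hw, monthScan_short w hw]
      refine (prefixMap_getD_of_no_match _ ?_).symm
      intro kv hkv hq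
      have h3 := (month_key_fact kv hkv).1
      have hlen : (sliceTo3 kv.1).length = (sliceTo3 w).length := by rw [hq]
      simp only [sliceTo3_eq, List.length_take] at hlen
      omega
  · have hm := PySem.Dict.mem_items_of_get?_eq_some _ h1
    exact ((month_key_fact _ hm).2).symm

-- ===== VERDICT (by name: the statement is the Claim_ definition above) =====
theorem get_month_num_py_spec : Claim_equal_get_month_num_py := by
  intro word _
  show get_month_num_py word = get_month_num_py_alt word
  unfold get_month_num_py get_month_num_py_alt
  exact core_eq _
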